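-- pv_equiv track=rewrite | github.com/Lonobers88/lc-stack | openwebui-config/filters/redux_mail_pipe.py | _is_awaiting_imap
-- ===== SOURCE A (Python) =====
-- def _is_awaiting_imap(messages: list) -> bool:
--     """Kijk of de AI in de vorige berichten om IMAP gegevens heeft gevraagd."""
--     for msg in reversed(messages):
--         if msg.get("role") == "assistant":
--             content = (msg.get("content", "") or "").lower()
--             if "imap" in content and ("host" in content or "wachtwoord" in content or "server" in content):
--                 return True
--             break
--     return False
-- ===== SOURCE B (Python) =====
-- def _is_awaiting_imap(messages: list) -> bool:
--     """Kijk of de AI in de vorige berichten om IMAP gegevens heeft gevraagd."""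
--     last = None
--     for msg in messages:
--         if msg.get("role") == "assistant":
--             last = (msg.get("content", "") or "").lower()
--     if last is None:
--         return False
--     return "imap" in last and ("host" in last or "wachtwoord" in last or "server" in last)
-- ===== Notes on version B (the rewrite author's own statement) =====
-- stated objective: alternative
-- what changed: Forward single pass keeping the latest assistant message's normalized content in an accumulator, with the keyword test applied once after the loop, instead of scanning reversed(messages) and breaking at the first assistant message.
import Mathlib
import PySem

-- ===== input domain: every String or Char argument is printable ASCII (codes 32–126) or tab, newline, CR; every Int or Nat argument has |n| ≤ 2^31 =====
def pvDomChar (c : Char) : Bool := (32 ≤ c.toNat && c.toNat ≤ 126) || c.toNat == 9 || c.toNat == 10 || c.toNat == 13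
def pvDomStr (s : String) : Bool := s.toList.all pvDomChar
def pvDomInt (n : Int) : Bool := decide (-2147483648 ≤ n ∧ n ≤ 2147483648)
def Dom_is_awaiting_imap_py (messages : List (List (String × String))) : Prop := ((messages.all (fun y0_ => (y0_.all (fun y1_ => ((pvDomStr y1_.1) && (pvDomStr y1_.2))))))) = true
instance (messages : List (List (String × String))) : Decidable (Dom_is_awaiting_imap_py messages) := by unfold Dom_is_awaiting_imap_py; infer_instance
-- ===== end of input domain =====

-- B changes the decomposition: one forward pass keeping the latest assistant content, keyword test applied once after the loop (alternative, not faster).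

-- ===== PORT A =====
-- the keyword test on an already-lowercased content ('imap' in content and (…))
def pvKwTest (content : String) : Bool :=
  PySem.Str.isIn "imap" content &&
    (PySem.Str.isIn "host" content || PySem.Str.isIn "wachtwoord" content || PySem.Str.isIn "server" content)

-- the loop body of A over reversed(messages): first assistant message decides, then break
def pvGoA : List (List (String × String)) → Bool
  | [] => false
  | msg :: rest =>
    if (PySem.Dict.mk msg).get? "role" == some "assistant" then
      -- (msg.get("content","") or "").lower(): 'or ""' is the identity on the string default
      pvKwTest (PySem.Str.lower ((PySem.Dict.mk msg).getD "content" ""))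
    else pvGoA rest

def is_awaiting_imap_py (messages : List (List (String × String))) : Bool :=
  pvGoA messages.reverse

-- ===== PORT B =====
-- B's loop body: remember the latest assistant message's normalized content
def pvStepB (acc : Option String) (msg : List (String × String)) : Option String :=
  if (PySem.Dict.mk msg).get? "role" == some "assistant" then
    some (PySem.Str.lower ((PySem.Dict.mk msg).getD "content" ""))
  else acc

-- B's code after the loop: 'if last is None: return False' then the keyword test
def pvFinB : Option String → Bool
  | none => false
  | some last => pvKwTest last

def is_awaiting_imap_py_alt (messages : List (List (String × String))) : Bool :=
  pvFinB (messages.foldl pvStepB none)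

-- ===== PRECONDITION & SPEC =====
def Spec_is_awaiting_imap_py (messages : List (List (String × String))) (out : Bool) : Prop := out = is_awaiting_imap_py_alt messages
instance (messages : List (List (String × String))) (out : Bool) : Decidable (Spec_is_awaiting_imap_py messages out) := by unfold Spec_is_awaiting_imap_py; infer_instance

-- ===== CLAIM (what is proved, stated in full; the proofs are below) =====
def Claim_equal_is_awaiting_imap_py : Prop := ∀ (messages : List (List (String × String))), Dom_is_awaiting_imap_py messages → Spec_is_awaiting_imap_py messages (is_awaiting_imap_py messages)

-- ===== LEMMAS AND PROOFS =====
-- B's forward fold, read off a reversed list, is A's first-assistant scan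
lemma pvFold_eq_goA (r : List (List (String × String))) :
    pvFinB (r.reverse.foldl pvStepB none) = pvGoA r := by
  induction r with
  | nil => rfl
  | cons m r' ih =>
    simp only [List.reverse_cons, List.foldl_append, List.foldl_cons, List.foldl_nil]
    by_cases h : ((PySem.Dict.mk m).get? "role" == some "assistant") = true
    · simp only [pvStepB, pvGoA, h, if_true, pvFinB]
    · simp only [Bool.not_eq_true] at h
      simp only [pvStepB, pvGoA, h, Bool.false_eq_true, if_false, ih]

-- ===== VERDICT (by name: the statement is the Claim_ definition above) =====
theorem is_awaiting_imap_py_spec : Claim_equal_is_awaiting_imap_py := by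
  intro messages _
  unfold Spec_is_awaiting_imap_py is_awaiting_imap_py is_awaiting_imap_py_alt
  rw [← pvFold_eq_goA messages.reverse, List.reverse_reverse]
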